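-- pv_equiv track=rewrite | github.com/amenti-labs/vibecraft | mcp-server/src/vibecraft/geometric_algorithms.py | _generate_ascii_preview
-- ===== SOURCE A (Python) =====
-- from typing import List, Tuple, Dict, Any
--
-- def _generate_ascii_preview(
--     coordinates: List[Tuple[int, int]], radius: int, center: Tuple[int, int]
-- ) -> str:
--     """Generate ASCII art preview of 2D shape"""
--     if not coordinates:
--         return ""
--
--     # Create grid
--     size = radius * 2 + 3
--     grid = [[" " for _ in range(size)] for _ in range(size)]
--
--     cx, cz = center
--     offset_x = radius + 1 - cx
--     offset_z = radius + 1 - cz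
--
--     for x, z in coordinates:
--         grid_x = x + offset_x
--         grid_z = z + offset_z
--         if 0 <= grid_x < size and 0 <= grid_z < size:
--             grid[grid_z][grid_x] = "█"
--
--     # Add center marker
--     center_x = cx + offset_x
--     center_z = cz + offset_z
--     if 0 <= center_x < size and 0 <= center_z < size:
--         grid[center_z][center_x] = "+"
--
--     return "\n".join(["".join(row) for row in grid])
-- ===== SOURCE B (Python) =====
-- def _generate_ascii_preview(coordinates, radius, center):
--     if not coordinates:
--         return ""
--
--     size = radius * 2 + 3
--     cx, cz = center
--     offset_x = radius + 1 - cx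
--     offset_z = radius + 1 - cz
--
--     # set of mapped in-bounds coordinates; no grid is materialised or mutated
--     filled = {
--         (x + offset_x, z + offset_z)
--         for x, z in coordinates
--         if 0 <= x + offset_x < size and 0 <= z + offset_z < size
--     }
--
--     center_x = cx + offset_x
--     center_z = cz + offset_z
--
--     return "\n".join(
--         "".join(
--             "+" if (x, z) == (center_x, center_z)
--             else ("█" if (x, z) in filled else " ")
--             for x in range(size)
--         )
--         for z in range(size)
--     )
-- ===== Notes on version B (the rewrite author's own statement) =====
-- stated objective: simpler
-- what changed: Instead of allocating a size*size grid and mutating cells in place, B builds a set of in-bounds mapped coordinates once and renders the output directly with a nested comprehension that queries the set (center checked first, so no overwrite pass is needed).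
import Mathlib
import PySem

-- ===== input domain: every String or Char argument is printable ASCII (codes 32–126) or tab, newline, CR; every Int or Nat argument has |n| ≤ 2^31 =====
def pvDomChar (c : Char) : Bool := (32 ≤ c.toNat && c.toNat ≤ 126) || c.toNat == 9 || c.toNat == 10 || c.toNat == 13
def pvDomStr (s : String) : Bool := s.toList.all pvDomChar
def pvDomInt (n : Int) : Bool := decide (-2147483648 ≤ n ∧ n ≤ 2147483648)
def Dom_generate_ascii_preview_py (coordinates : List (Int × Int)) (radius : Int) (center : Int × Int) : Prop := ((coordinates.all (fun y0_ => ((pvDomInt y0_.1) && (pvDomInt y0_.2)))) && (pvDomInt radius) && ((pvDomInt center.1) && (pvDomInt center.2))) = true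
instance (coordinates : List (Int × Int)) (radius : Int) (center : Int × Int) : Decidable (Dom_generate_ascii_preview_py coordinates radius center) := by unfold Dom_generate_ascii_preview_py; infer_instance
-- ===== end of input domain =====

-- B replaces A's mutated size×size character grid by a set of in-bounds mapped coordinates,
-- rendered directly with a nested comprehension (objective: simpler; same asymptotic cost).

-- ===== PORT A =====
-- A-side helper: the body of A's 'for x, z in coordinates' loop (grid[grid_z][grid_x] = "█" under the bounds check)
def pvSetCell (size ox oz : Int) (g : List (List Char)) (p : Int × Int) : List (List Char) :=
  if 0 ≤ p.1 + ox ∧ p.1 + ox < size ∧ 0 ≤ p.2 + oz ∧ p.2 + oz < size then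
    g.modify (p.2 + oz).toNat (fun row => row.set (p.1 + ox).toNat '█')
  else g

def generate_ascii_preview_py (coordinates : List (Int × Int)) (radius : Int) (center : Int × Int) : String :=
  if coordinates = [] then "" else
    let size : Int := radius * 2 + 3
    let grid0 : List (List Char) := List.replicate size.toNat (List.replicate size.toNat ' ')
    let offset_x := radius + 1 - center.1
    let offset_z := radius + 1 - center.2
    let grid := coordinates.foldl (pvSetCell size offset_x offset_z) grid0
    let center_x := center.1 + offset_x
    let center_z := center.2 + offset_z
    let grid2 :=
      if 0 ≤ center_x ∧ center_x < size ∧ 0 ≤ center_z ∧ center_z < size then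
        grid.modify center_z.toNat (fun row => row.set center_x.toNat '+')
      else grid
    String.intercalate "\n" (grid2.map (fun row => String.mk row))

-- ===== PORT B =====
-- B-side helper: the mapped coordinate of one input point, if it lands inside the grid
def pvMapped (size ox oz : Int) (p : Int × Int) : Option (Int × Int) :=
  if 0 ≤ p.1 + ox ∧ p.1 + ox < size ∧ 0 ≤ p.2 + oz ∧ p.2 + oz < size
  then some (p.1 + ox, p.2 + oz) else none

-- B-side helper: the character at column x, row z
def pvCellChar (filled : PySem.Set (Int × Int)) (cX cZ x z : Int) : Char :=
  if x = cX ∧ z = cZ then '+'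
  else if (x, z) ∈ filled then '█' else ' '

def generate_ascii_preview_py_alt (coordinates : List (Int × Int)) (radius : Int) (center : Int × Int) : String :=
  if coordinates = [] then "" else
    let size : Int := radius * 2 + 3
    let offset_x := radius + 1 - center.1
    let offset_z := radius + 1 - center.2
    let filled : PySem.Set (Int × Int) :=
      PySem.Set.ofList (coordinates.filterMap (pvMapped size offset_x offset_z))
    let center_x := center.1 + offset_x
    let center_z := center.2 + offset_z
    String.intercalate "\n" ((PySem.List.pyRange 0 size 1).map (fun z =>
      String.mk ((PySem.List.pyRange 0 size 1).map (fun x =>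
        pvCellChar filled center_x center_z x z))))

-- ===== PRECONDITION & SPEC =====
def Spec_generate_ascii_preview_py (coordinates : List (Int × Int)) (radius : Int) (center : Int × Int) (out : String) : Prop := out = generate_ascii_preview_py_alt coordinates radius center
instance (coordinates : List (Int × Int)) (radius : Int) (center : Int × Int) (out : String) : Decidable (Spec_generate_ascii_preview_py coordinates radius center out) := by unfold Spec_generate_ascii_preview_py; infer_instance

-- ===== CLAIM (what is proved, stated in full; the proofs are below) =====
def Claim_equal_generate_ascii_preview_py : Prop := ∀ (coordinates : List (Int × Int)) (radius : Int) (center : Int × Int), Dom_generate_ascii_preview_py coordinates radius center → Spec_generate_ascii_preview_py coordinates radius center (generate_ascii_preview_py coordinates radius center)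

-- ===== LEMMAS AND PROOFS =====

/-- Cell (row j, column i) of a grid, as an option. -/
def pvCell (g : List (List Char)) (j i : Nat) : Option Char := (g[j]?).bind (fun row => row[i]?)

/-- The grid is an n×n matrix. -/
def pvShaped (n : Nat) (g : List (List Char)) : Prop :=
  g.length = n ∧ ∀ row ∈ g, row.length = n

theorem pvShaped_replicate (n : Nat) :
    pvShaped n (List.replicate n (List.replicate n ' ')) := by
  unfold pvShaped
  refine ⟨List.length_replicate, ?_⟩
  intro row hrow
  rw [List.eq_of_mem_replicate hrow]
  exact List.length_replicate

theorem pvShaped_modify_set {n : Nat} {g : List (List Char)} (h : pvShaped n g)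
    (j i : Nat) (c : Char) : pvShaped n (g.modify j (fun row => row.set i c)) := by
  obtain ⟨hl, hr⟩ := h
  refine ⟨by simpa using hl, ?_⟩
  intro row hrow
  obtain ⟨k, hk⟩ := List.mem_iff_getElem?.1 hrow
  rw [List.getElem?_modify] at hk
  cases hg : g[k]? with
  | none => simp [hg] at hk
  | some r =>
    have hrm : r ∈ g := List.mem_of_getElem? hg
    rw [hg] at hk
    split at hk
    · have hk' : row = r.set i c := by simpa using hk.symm
      rw [hk', List.length_set]
      exact hr r hrm
    · have hk' : row = r := by simpa using hk.symm
      rw [hk']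
      exact hr r hrm

theorem pvCell_modify_set {n : Nat} {g : List (List Char)} (h : pvShaped n g)
    {j i : Nat} (hj : j < n) (hi : i < n) (c : Char) (j' i' : Nat) :
    pvCell (g.modify j (fun row => row.set i c)) j' i'
      = if j' = j ∧ i' = i then some c else pvCell g j' i' := by
  obtain ⟨hl, hr⟩ := h
  unfold pvCell
  rw [List.getElem?_modify]
  by_cases hj' : j' < n
  · have hg : g[j']? = some g[j'] := List.getElem?_eq_getElem (by omega)
    have hrowlen : g[j'].length = n := hr _ (List.getElem_mem _)
    rw [hg]
    simp only [Option.bind_some]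
    by_cases hjj : j' = j
    · subst hjj
      by_cases hii : i' = i
      · subst hii
        simp [hrowlen, hi]
      · simp [Ne.symm hii, hii]
    · simp [Ne.symm hjj, hjj]
  · have hg : g[j']? = none := List.getElem?_eq_none (by omega)
    rw [hg]
    have : ¬ (j' = j ∧ i' = i) := by rintro ⟨rfl, rfl⟩; omega
    simp [this]

theorem pvShaped_foldl {size ox oz : Int} :
    ∀ (cs : List (Int × Int)) {g : List (List Char)}, pvShaped size.toNat g →
      pvShaped size.toNat (cs.foldl (pvSetCell size ox oz) g) := by
  intro cs
  induction cs with
  | nil => intro g h; simpa using h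
  | cons p rest ih =>
    intro g h
    rw [List.foldl_cons]
    apply ih
    unfold pvSetCell
    split
    · exact pvShaped_modify_set h _ _ _
    · exact h


theorem pvCell_foldl {size ox oz : Int} :
    ∀ (cs : List (Int × Int)) {g : List (List Char)}, pvShaped size.toNat g →
      ∀ (j i : Nat), j < size.toNat → i < size.toNat →
      pvCell (cs.foldl (pvSetCell size ox oz) g) j i
        = if cs.any (fun p => decide (p.1 + ox = (i : Int) ∧ p.2 + oz = (j : Int)))
          then some '█' else pvCell g j i := by
  intro cs
  induction cs with
  | nil => intro g _ j i _ _; simp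
  | cons p rest ih =>
    intro g hg j i hj hi
    rw [List.foldl_cons, List.any_cons]
    have hiInt : (i : Int) < size := by omega
    have hjInt : (j : Int) < size := by omega
    by_cases hin : 0 ≤ p.1 + ox ∧ p.1 + ox < size ∧ 0 ≤ p.2 + oz ∧ p.2 + oz < size
    · obtain ⟨h1, h2, h3, h4⟩ := hin
      have hstep : pvSetCell size ox oz g p
          = g.modify (p.2 + oz).toNat (fun row => row.set (p.1 + ox).toNat '█') := by
        unfold pvSetCell
        rw [if_pos ⟨h1, h2, h3, h4⟩]
      have hx : (p.1 + ox).toNat < size.toNat := by omega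
      have hz : (p.2 + oz).toNat < size.toNat := by omega
      rw [hstep, ih (pvShaped_modify_set hg _ _ _) j i hj hi,
          pvCell_modify_set hg hz hx '█' j i]
      have heq : (j = (p.2 + oz).toNat ∧ i = (p.1 + ox).toNat)
          ↔ (p.1 + ox = (i : Int) ∧ p.2 + oz = (j : Int)) := by omega
      by_cases hrest : rest.any (fun p => decide (p.1 + ox = (i : Int) ∧ p.2 + oz = (j : Int))) = true
      · have hor : (decide (p.1 + ox = (i : Int) ∧ p.2 + oz = (j : Int))
            || rest.any (fun p => decide (p.1 + ox = (i : Int) ∧ p.2 + oz = (j : Int)))) = true := by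
          rw [hrest, Bool.or_true]
        rw [if_pos hrest, if_pos hor]
      · have hf : rest.any (fun p => decide (p.1 + ox = (i : Int) ∧ p.2 + oz = (j : Int))) = false :=
          Bool.eq_false_iff.2 hrest
        rw [if_neg hrest]
        by_cases hp : p.1 + ox = (i : Int) ∧ p.2 + oz = (j : Int)
        · rw [if_pos (heq.2 hp),
              if_pos (show _ = true by rw [hf, Bool.or_false]; exact decide_eq_true hp)]
        · rw [if_neg (fun hc => hp (heq.1 hc)),
              if_neg (show ¬ _ = true by rw [hf, Bool.or_false, decide_eq_false hp]; exact Bool.false_ne_true)]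
    · have hstep : pvSetCell size ox oz g p = g := by
        unfold pvSetCell
        rw [if_neg hin]
      have hp : ¬ (p.1 + ox = (i : Int) ∧ p.2 + oz = (j : Int)) := by
        rintro ⟨e1, e2⟩
        exact hin ⟨by omega, by omega, by omega, by omega⟩
      rw [hstep, ih hg j i hj hi, decide_eq_false hp, Bool.false_or]

theorem pvCell_grid0 {n : Nat} {j i : Nat} (hj : j < n) (hi : i < n) :
    pvCell (List.replicate n (List.replicate n ' ')) j i = some ' ' := by
  unfold pvCell
  simp [hj, hi]

theorem pvFilled_mem (coordinates : List (Int × Int)) (size ox oz : Int)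
    (x z : Int) (hx0 : 0 ≤ x) (hx : x < size) (hz0 : 0 ≤ z) (hz : z < size) :
    ((x, z) ∈ PySem.Set.ofList (coordinates.filterMap (pvMapped size ox oz)))
      ↔ coordinates.any (fun p => decide (p.1 + ox = x ∧ p.2 + oz = z)) = true := by
  rw [PySem.Set.mem_ofList, List.mem_filterMap, List.any_eq_true]
  constructor
  · rintro ⟨p, hp, hm⟩
    refine ⟨p, hp, ?_⟩
    unfold pvMapped at hm
    split at hm
    · simp only [Option.some.injEq, Prod.mk.injEq] at hm
      simp [hm.1, hm.2]
    · exact absurd hm (by simp)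
  · rintro ⟨p, hp, hm⟩
    simp only [decide_eq_true_eq] at hm
    refine ⟨p, hp, ?_⟩
    unfold pvMapped
    rw [if_pos ⟨by omega, by omega, by omega, by omega⟩]
    simp [hm.1, hm.2]

-- ===== VERDICT (by name: the statement is the Claim_ definition above) =====
theorem generate_ascii_preview_py_spec : Claim_equal_generate_ascii_preview_py := by
  intro coordinates radius center _
  unfold Spec_generate_ascii_preview_py
  unfold generate_ascii_preview_py generate_ascii_preview_py_alt
  by_cases hc : coordinates = []
  · simp [hc]
  · rw [if_neg hc, if_neg hc]
    dsimp only
    set size : Int := radius * 2 + 3 with hsize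
    set n : Nat := size.toNat with hn
    set ox : Int := radius + 1 - center.1 with hox
    set oz : Int := radius + 1 - center.2 with hoz
    set filled : PySem.Set (Int × Int) :=
      PySem.Set.ofList (coordinates.filterMap (pvMapped size ox oz)) with hfill
    have hcx : center.1 + ox = radius + 1 := by omega
    have hcz : center.2 + oz = radius + 1 := by omega
    set grid0 : List (List Char) := List.replicate n (List.replicate n ' ') with hg0
    set grid := coordinates.foldl (pvSetCell size ox oz) grid0 with hgrid
    have hshape0 : pvShaped n grid0 := pvShaped_replicate n
    have hshape : pvShaped n grid := pvShaped_foldl coordinates hshape0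
    set grid2 := if 0 ≤ center.1 + ox ∧ center.1 + ox < size ∧ 0 ≤ center.2 + oz ∧ center.2 + oz < size
        then grid.modify (center.2 + oz).toNat (fun row => row.set (center.1 + ox).toNat '+')
        else grid with hg2
    have hshape2 : pvShaped n grid2 := by
      rw [hg2]; split
      · exact pvShaped_modify_set hshape _ _ _
      · exact hshape
    -- the per-cell characterisation, for j i < n
    have hcell : ∀ j i : Nat, j < n → i < n →
        pvCell grid2 j i = some (pvCellChar filled (center.1 + ox) (center.2 + oz) (i : Int) (j : Int)) := by
      intro j i hj hi
      have hpos : 0 < n := by omega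
      have hr1 : (0:Int) ≤ radius + 1 := by omega
      have hr2 : radius + 1 < size := by omega
      have hG : 0 ≤ center.1 + ox ∧ center.1 + ox < size ∧ 0 ≤ center.2 + oz ∧ center.2 + oz < size := by
        omega
      have hznat : (center.2 + oz).toNat < n := by omega
      have hxnat : (center.1 + ox).toNat < n := by omega
      rw [hg2, if_pos hG, pvCell_modify_set hshape hznat hxnat '+' j i]
      have hidx : (j = (center.2 + oz).toNat ∧ i = (center.1 + ox).toNat)
          ↔ ((i : Int) = center.1 + ox ∧ (j : Int) = center.2 + oz) := by omega
      unfold pvCellChar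
      by_cases hcen : (i : Int) = center.1 + ox ∧ (j : Int) = center.2 + oz
      · rw [if_pos (hidx.2 hcen), if_pos hcen]
      · rw [if_neg (fun hc => hcen (hidx.1 hc)), if_neg hcen]
        rw [hgrid, pvCell_foldl coordinates hshape0 j i hj hi]
        have hmem := pvFilled_mem coordinates size ox oz (i : Int) (j : Int)
          (by omega) (by omega) (by omega) (by omega)
        by_cases hany : coordinates.any
            (fun p => decide (p.1 + ox = (i : Int) ∧ p.2 + oz = (j : Int))) = true
        · rw [if_pos hany, if_pos (hmem.2 hany)]
        · have hnm : ¬ ((i : Int), (j : Int)) ∈ filled := fun h => hany (hmem.1 h)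
          rw [if_neg (by simpa using hany), if_neg hnm, pvCell_grid0 hj hi]
    -- now the whole strings
    congr 1
    apply List.ext_getElem?
    intro k
    rw [List.getElem?_map, List.getElem?_map]
    by_cases hk : k < n
    · have hpr : (PySem.List.pyRange 0 size 1)[k]? = some ((k : Int)) := by
        rw [PySem.List.getElem?_pyRange_one, if_pos (by omega : k < (size - 0).toNat)]
        norm_num
      have hg2k : ∃ row, grid2[k]? = some row ∧ row.length = n := by
        obtain ⟨hl, hr⟩ := hshape2
        refine ⟨grid2[k]'(by omega), List.getElem?_eq_getElem (by omega), hr _ (List.getElem_mem _)⟩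
      obtain ⟨row, hrowk, hrowlen⟩ := hg2k
      rw [hrowk, hpr]
      simp only [Option.map_some, Option.some.injEq]
      congr 1
      apply List.ext_getElem?
      intro m
      rw [List.getElem?_map]
      by_cases hm : m < n
      · have hprm : (PySem.List.pyRange 0 size 1)[m]? = some ((m : Int)) := by
          rw [PySem.List.getElem?_pyRange_one, if_pos (by omega : m < (size - 0).toNat)]
          norm_num
        rw [hprm]
        have := hcell k m hk hm
        unfold pvCell at this
        rw [hrowk] at this
        simp only [Option.bind_some] at this
        rw [this]
        simp
      · have h1 : row[m]? = none := List.getElem?_eq_none (by omega)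
        have h2 : (PySem.List.pyRange 0 size 1)[m]? = none := by
          apply List.getElem?_eq_none
          rw [PySem.List.length_pyRange_one]
          omega
        rw [h1, h2]
        simp
    · have h1 : grid2[k]? = none := List.getElem?_eq_none (by rw [hshape2.1]; omega)
      have h2 : (PySem.List.pyRange 0 size 1)[k]? = none := by
        apply List.getElem?_eq_none
        rw [PySem.List.length_pyRange_one]
        omega
      rw [h1, h2]
      simp
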